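-- pv_equiv track=rewrite | github.com/saurabh-kumbhar/python-course-practice | CompletePythonCourse/PythonCourse-master/Section_04/assignment_07.py | string_match
-- ===== SOURCE A (Python) =====
-- def string_match(a, b):
--     length = len(a)
--     count = 0
--     if len(a) > len(b):
--         length = len(b)
--
--     for i in range(length-1):
--         if a[i] == b[i] and a[i+1] == b[i+1]:
--             count += 1
--
--     return count
-- ===== SOURCE B (Python) =====
-- def string_match(a, b):
--     # Run-length algorithm: a maximal run of L consecutive equal positions
--     # contains exactly L-1 adjacent matching pairs, so sum (L-1) over runs.
--     count = 0
--     run = 0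
--     for x, y in zip(a, b):
--         if x == y:
--             run += 1
--         else:
--             if run > 1:
--                 count += run - 1
--             run = 0
--     if run > 1:
--         count += run - 1
--     return count
-- ===== Notes on version B (the rewrite author's own statement) =====
-- stated objective: alternative
-- what changed: Replaces A's adjacent-pair test (re-indexing both strings at i and i+1 for each i under a min-length bound) with a run-length algorithm: a single zip walk tracks the length of the current maximal run of equal positions and adds run-1 per run, never comparing two adjacent positions together.
import Mathlib
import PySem

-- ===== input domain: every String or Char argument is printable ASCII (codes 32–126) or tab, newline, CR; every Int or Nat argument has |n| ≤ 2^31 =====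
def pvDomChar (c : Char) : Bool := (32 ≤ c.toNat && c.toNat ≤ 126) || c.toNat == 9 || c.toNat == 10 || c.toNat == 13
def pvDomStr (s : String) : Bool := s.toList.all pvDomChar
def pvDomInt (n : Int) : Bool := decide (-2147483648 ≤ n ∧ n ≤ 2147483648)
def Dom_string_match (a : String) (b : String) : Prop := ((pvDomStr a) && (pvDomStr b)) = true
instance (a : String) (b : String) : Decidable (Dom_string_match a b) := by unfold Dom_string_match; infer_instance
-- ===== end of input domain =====

-- B uses a run-length algorithm (each maximal run of L equal positions yields L-1 pairs) instead of A's adjacent-pair test; same O(n) cost.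

-- ===== PORT A =====
-- Literal port of A: length = min of the two lengths via A's if, then a loop over
-- range(length-1) testing a[i]==b[i] and a[i+1]==b[i+1].  Every index used is in
-- range (i+1 ≤ length-1+1 ≤ both lengths), so pyGetD's default ' ' is never read.
def string_match (a : String) (b : String) : Int :=
  let la := a.toList
  let lb := b.toList
  let length : Int := if (la.length : Int) > (lb.length : Int) then (lb.length : Int) else (la.length : Int)
  (PySem.List.pyRange 0 (length - 1) 1).foldl
    (fun count i =>
      if PySem.List.pyGetD la i ' ' = PySem.List.pyGetD lb i ' ' ∧
         PySem.List.pyGetD la (i + 1) ' ' = PySem.List.pyGetD lb (i + 1) ' '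
      then count + 1 else count)
    0

-- ===== PORT B =====
-- Source B's loop body: state (count, run); equal position extends the run,
-- a mismatch flushes the run (adding run-1 if run > 1) and resets it.
def runStep (s : Int × Int) (e : Bool) : Int × Int :=
  if e then (s.1, s.2 + 1)
  else (if s.2 > 1 then s.1 + s.2 - 1 else s.1, 0)

def string_match_alt (a : String) (b : String) : Int :=
  let p := (List.zipWith (fun x y => x == y) a.toList b.toList).foldl runStep (0, 0)
  -- Source B's final flush after the loop
  if p.2 > 1 then p.1 + p.2 - 1 else p.1

-- ===== PRECONDITION & SPEC =====
def Spec_string_match (a : String) (b : String) (out : Int) : Prop := out = string_match_alt a b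
instance (a : String) (b : String) (out : Int) : Decidable (Spec_string_match a b out) := by unfold Spec_string_match; infer_instance

-- ===== CLAIM (what is proved, stated in full; the proofs are below) =====
def Claim_equal_string_match : Prop := ∀ (a : String) (b : String), Dom_string_match a b → Spec_string_match a b (string_match a b)

-- ===== LEMMAS AND PROOFS =====

-- Proof-only intermediate: the number of adjacent True pairs in a boolean list.
def pairCount : List Bool → Int
  | x :: y :: rest => (if x && y then 1 else 0) + pairCount (y :: rest)
  | _ => 0

-- The indexed 0/1 sum over the first (min len - 1) positions equals the pair scan.
theorem key_sum (la : List Char) : ∀ (lb : List Char),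
    ((List.range (min la.length lb.length - 1)).map
      (fun k => if la.getD k ' ' = lb.getD k ' ' ∧ la.getD (k + 1) ' ' = lb.getD (k + 1) ' '
                then (1 : Int) else 0)).sum
    = pairCount (List.zipWith (fun x y => x == y) la lb) := by
  induction la with
  | nil => intro lb; simp [pairCount]
  | cons x rest ih =>
    intro lb
    match lb, rest with
    | [], _ => simp [pairCount]
    | [y], _ => simp [pairCount.eq_def]
    | y :: y' :: ys, [] => simp [pairCount]
    | y :: y' :: ys, x' :: xs =>
      have hm : min (x :: x' :: xs).length (y :: y' :: ys).length - 1
          = (min (x' :: xs).length (y' :: ys).length - 1) + 1 := by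
        simp only [List.length_cons]; omega
      rw [hm, List.range_succ_eq_map, List.map_cons, List.map_map, List.sum_cons]
      have htail : ((fun k =>
            if (x :: x' :: xs).getD k ' ' = (y :: y' :: ys).getD k ' ' ∧
               (x :: x' :: xs).getD (k + 1) ' ' = (y :: y' :: ys).getD (k + 1) ' '
            then (1 : Int) else 0) ∘ Nat.succ)
          = fun k =>
            if (x' :: xs).getD k ' ' = (y' :: ys).getD k ' ' ∧
               (x' :: xs).getD (k + 1) ' ' = (y' :: ys).getD (k + 1) ' '
            then (1 : Int) else 0 := by
        funext k
        simp [Function.comp, List.getD]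
      rw [htail, ih (y' :: ys)]
      show _ = pairCount ((x == y) :: (x' == y') :: List.zipWith (fun x y => x == y) xs ys)
      rw [pairCount]
      congr 1
      by_cases h1 : x = y <;> by_cases h2 : x' = y' <;> simp [h1, h2, List.getD]

-- A leading False contributes no pair.
theorem pairCount_false_cons (m : List Bool) : pairCount (false :: m) = pairCount m := by
  cases m with
  | nil => simp [pairCount]
  | cons y ys => simp [pairCount]

-- A run of n Trues followed by a mismatch contributes n-1 pairs (for n > 1).
theorem pairCount_repl_false (n : Nat) : ∀ (m : List Bool),
    pairCount (List.replicate n true ++ false :: m)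
      = (if 1 < n then (n : Int) - 1 else 0) + pairCount m := by
  induction n with
  | zero => intro m; simpa using pairCount_false_cons m
  | succ k ih =>
    intro m
    cases k with
    | zero => simp [pairCount, pairCount_false_cons]
    | succ j =>
      have : List.replicate (j + 1 + 1) true ++ false :: m
          = true :: true :: (List.replicate j true ++ false :: m) := by
        simp [List.replicate_succ]
      rw [this]
      have h2 : (true : Bool) :: (List.replicate j true ++ false :: m)
          = List.replicate (j + 1) true ++ false :: m := by
        simp [List.replicate_succ]
      rw [pairCount, h2, ih m]
      have hone : (if (true && true) = true then (1 : Int) else 0) = 1 := by simp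
      rw [hone]
      generalize pairCount m = p
      split_ifs <;> omega

-- A terminal run of n Trues contributes n-1 pairs (for n > 1).
theorem pairCount_repl (n : Nat) :
    pairCount (List.replicate n true) = if 1 < n then (n : Int) - 1 else 0 := by
  induction n with
  | zero => simp [pairCount]
  | succ k ih =>
    cases k with
    | zero => simp [pairCount]
    | succ j =>
      have : List.replicate (j + 1 + 1) true = true :: List.replicate (j + 1) true := by
        simp [List.replicate_succ]
      rw [this]
      have hrw : (true : Bool) :: List.replicate j true = List.replicate (j + 1) true := by
        simp [List.replicate_succ]
      rw [show List.replicate (j+1) (true : Bool) = true :: List.replicate j true from by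
            simp [List.replicate_succ], pairCount, hrw, ih]
      have hone : (if (true && true) = true then (1 : Int) else 0) = 1 := by simp
      rw [hone]
      split_ifs <;> omega

-- Loop invariant for B's fold: with count c and a pending run of r equal
-- positions, the flushed result equals c plus the pairs of (replicate r true ++ m).
theorem run_invariant : ∀ (m : List Bool) (c : Int) (r : Nat),
    (let p := m.foldl runStep (c, (r : Int));
     if p.2 > 1 then p.1 + p.2 - 1 else p.1)
      = c + pairCount (List.replicate r true ++ m) := by
  intro m
  induction m with
  | nil =>
    intro c r
    simp only [List.foldl_nil, List.append_nil, pairCount_repl]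
    split_ifs <;> omega
  | cons e m' ih =>
    intro c r
    cases e with
    | true =>
      have hstep : runStep (c, (r : Int)) true = (c, ((r + 1 : Nat) : Int)) := by
        simp [runStep]
      have hlist : List.replicate r true ++ true :: m'
          = List.replicate (r + 1) true ++ m' := by
        simp [List.replicate_succ']
      simp only [List.foldl_cons, hstep, ih c (r + 1), hlist]
    | false =>
      have hstep : runStep (c, (r : Int)) false
          = (if (r : Int) > 1 then c + r - 1 else c, ((0 : Nat) : Int)) := by
        simp [runStep]
      simp only [List.foldl_cons, hstep,
        ih (if (r : Int) > 1 then c + r - 1 else c) 0,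
        pairCount_repl_false r m']
      simp only [List.replicate_zero, List.nil_append]
      split_ifs <;> omega

-- ===== VERDICT (by name: the statement is the Claim_ definition above) =====
theorem string_match_spec : Claim_equal_string_match := by
  intro a b _
  unfold Spec_string_match
  simp only [string_match, string_match_alt]
  have hlen : (if (a.toList.length : Int) > (b.toList.length : Int)
        then (b.toList.length : Int) else (a.toList.length : Int))
      = ((min a.toList.length b.toList.length : Nat) : Int) := by
    split <;> omega
  rw [hlen]
  have hbody : (fun (count : Int) (i : Int) =>
      if PySem.List.pyGetD a.toList i ' ' = PySem.List.pyGetD b.toList i ' ' ∧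
         PySem.List.pyGetD a.toList (i + 1) ' ' = PySem.List.pyGetD b.toList (i + 1) ' '
      then count + 1 else count)
      = fun count i => count +
        (if PySem.List.pyGetD a.toList i ' ' = PySem.List.pyGetD b.toList i ' ' ∧
            PySem.List.pyGetD a.toList (i + 1) ' ' = PySem.List.pyGetD b.toList (i + 1) ' '
         then (1 : Int) else 0) := by
    funext c i; split <;> simp
  rw [hbody, PySem.List.foldl_add, PySem.List.pyRange_one]
  have hB := run_invariant (List.zipWith (fun x y => x == y) a.toList b.toList) 0 0
  simp only [List.replicate_zero, List.nil_append, Nat.cast_zero, zero_add] at hB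
  rw [hB, ← key_sum a.toList b.toList]
  have htn : (((min a.toList.length b.toList.length : Nat) : Int) - 1 - 0).toNat
      = min a.toList.length b.toList.length - 1 := by omega
  rw [htn, List.map_map]
  rw [zero_add]
  congr 1
  congr 1
  funext k
  have h1 : ((k : Int) + 1) = ((k + 1 : Nat) : Int) := by push_cast; ring
  simp only [Function.comp_apply, zero_add, h1, PySem.List.pyGetD_natCast]
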